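-- pv_equiv track=rewrite | github.com/Densanon-devs/ultralight-coder | engine/self_heal.py | should_inject_diagnose
-- ===== SOURCE A (Python) =====
-- from typing import Optional
--
-- def should_inject_diagnose(streak: list[Optional[str]], min_streak: int = 2) -> bool:
--     """Should the next prompt include a diagnose preamble?
--
--     We fire when the LAST two non-None entries in `streak` are the SAME
--     failure class. The min_streak parameter lets callers tune for
--     chattier-or-stricter behavior; default 2 = after two consecutive
--     same-class failures, before the model's next attempt.
--
--     Streak is the running history of `classify_failure` returns from
--     the agent loop, oldest-first. None values represent successful
--     iterations and reset the run.
--     """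
--     if min_streak < 2:
--         return False
--     # Walk the tail backwards collecting the most-recent run of identical
--     # non-None classes. Stop as soon as we hit a None or a different class.
--     run = 0
--     last: Optional[str] = None
--     for cls in reversed(streak):
--         if cls is None:
--             break
--         if last is None:
--             last = cls
--             run = 1
--         elif cls == last:
--             run += 1
--         else:
--             break
--     return last is not None and run >= min_streak
-- ===== SOURCE B (Python) =====
-- from typing import Optional
--
-- def should_inject_diagnose(streak: list[Optional[str]], min_streak: int = 2) -> bool:
--     if min_streak < 2:
--         return False
--     if len(streak) < min_streak:
--         return False
--     tail = streak[-min_streak:]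
--     return tail[0] is not None and all(x == tail[0] for x in tail)
-- ===== Notes on version B (the rewrite author's own statement) =====
-- stated objective: simpler
-- what changed: Replaces the backward run-length accumulation loop (run/last state with break conditions) by a direct uniformity test over the fixed window of the last min_streak entries (slice, then all-equal-and-non-None).
import Mathlib
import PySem

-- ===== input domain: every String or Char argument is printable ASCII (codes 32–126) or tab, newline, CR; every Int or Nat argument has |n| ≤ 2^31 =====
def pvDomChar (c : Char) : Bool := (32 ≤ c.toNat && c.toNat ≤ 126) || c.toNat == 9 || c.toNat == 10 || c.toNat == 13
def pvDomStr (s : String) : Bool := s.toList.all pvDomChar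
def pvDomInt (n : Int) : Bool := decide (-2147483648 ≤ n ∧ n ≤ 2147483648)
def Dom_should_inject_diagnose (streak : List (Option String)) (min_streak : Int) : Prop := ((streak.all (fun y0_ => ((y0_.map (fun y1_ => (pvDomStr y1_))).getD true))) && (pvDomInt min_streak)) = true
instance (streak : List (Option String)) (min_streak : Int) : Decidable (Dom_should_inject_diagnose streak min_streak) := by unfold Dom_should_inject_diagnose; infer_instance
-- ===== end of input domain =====

-- B replaces A's backward run-length accumulation by a direct all-equal-and-non-None
-- test on the window of the last min_streak entries (objective: simpler).

-- ===== PORT A =====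
-- the `for cls in reversed(streak)` loop; state (run, last); `break` returns the state
def pyLoopA : List (Option String) → Int → Option String → Int × Option String
  | [], run, last => (run, last)
  | cls :: rest, run, last =>
    match cls with
    | none => (run, last)
    | some c =>
      match last with
      | none => pyLoopA rest 1 (some c)
      | some l => if c == l then pyLoopA rest (run + 1) (some l) else (run, last)

def should_inject_diagnose (streak : List (Option String)) (min_streak : Int) : Bool :=
  if min_streak < 2 then false
  else
    let p := pyLoopA streak.reverse 0 none
    p.2.isSome && decide (min_streak ≤ p.1)

-- ===== PORT B =====
-- `tail[0] is not None and all(x == tail[0] for x in tail)`; tail[0] via pyGet? (none = IndexError, unreachable under the guards)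
def pyTailCheck (tail : List (Option String)) : Bool :=
  match PySem.List.pyGet? tail 0 with
  | none => false
  | some h => h.isSome && tail.all (· == h)

def should_inject_diagnose_alt (streak : List (Option String)) (min_streak : Int) : Bool :=
  if min_streak < 2 then false
  else if (streak.length : Int) < min_streak then false
  else pyTailCheck (PySem.List.slice streak (some (-min_streak)) none)

-- ===== PRECONDITION & SPEC =====
def Spec_should_inject_diagnose (streak : List (Option String)) (min_streak : Int) (out : Bool) : Prop := out = should_inject_diagnose_alt streak min_streak
instance (streak : List (Option String)) (min_streak : Int) (out : Bool) : Decidable (Spec_should_inject_diagnose streak min_streak out) := by unfold Spec_should_inject_diagnose; infer_instance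

-- ===== CLAIM (what is proved, stated in full; the proofs are below) =====
def Claim_equal_should_inject_diagnose : Prop := ∀ (streak : List (Option String)) (min_streak : Int), Dom_should_inject_diagnose streak min_streak → Spec_should_inject_diagnose streak min_streak (should_inject_diagnose streak min_streak)

-- ===== LEMMAS AND PROOFS =====

-- A's loop once `last` is set: it adds the length of the run of `some c` at the head.
theorem pyLoopA_some (t : List (Option String)) (run : Int) (c : String) :
    pyLoopA t run (some c) =
      (run + ((t.takeWhile (· == some c)).length : Int), some c) := by
  induction t generalizing run with
  | nil => simp [pyLoopA]
  | cons a t ih =>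
    cases a with
    | none => simp [pyLoopA, List.takeWhile]
    | some d =>
      by_cases h : d = c
      · subst h
        simp [pyLoopA, List.takeWhile, ih]
        ring
      · have hb : ((some d : Option String) == some c) = false := by simp [h]
        simp [pyLoopA, List.takeWhile, h, hb]

-- takeWhile length bound ↔ prefix satisfies the predicate
theorem takeWhile_len_iff (p : Option String → Bool) (t : List (Option String)) (j : ℕ) :
    j ≤ (t.takeWhile p).length ↔ (∀ x ∈ t.take j, p x = true) ∧ j ≤ t.length := by
  induction t generalizing j with
  | nil => simp
  | cons a t ih =>
    cases j with
    | zero => simp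
    | succ j =>
      by_cases hp : p a = true
      · simp only [List.takeWhile_cons, hp, if_true, List.length_cons,
          Nat.add_le_add_iff_right, ih, List.take_succ_cons, List.mem_cons]
        constructor
        · rintro ⟨h1, h2⟩
          exact ⟨fun x hx => by rcases hx with rfl | hx; exact hp; exact h1 x hx, by omega⟩
        · rintro ⟨h1, h2⟩
          exact ⟨fun x hx => h1 x (Or.inr hx), by omega⟩
      · have hpa : p a = false := by simpa using hp
        constructor
        · intro h
          rw [List.takeWhile_cons, hpa] at h
          simp at h
        · rintro ⟨h1, -⟩
          exact absurd (h1 a (by simp)) (by simp [hpa])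

-- characterization of A for min_streak ≥ 2
theorem A_char (streak : List (Option String)) (n : Int) (hn : 2 ≤ n) :
    (should_inject_diagnose streak n = true ↔
      ∃ c, n.toNat ≤ streak.length ∧ ∀ x ∈ streak.reverse.take n.toNat, x = some c) := by
  have hn0 : (0:Int) ≤ n := by omega
  have hm2 : 2 ≤ n.toNat := by omega
  have hcast : ((n.toNat : Int)) = n := Int.toNat_of_nonneg hn0
  have hlen : streak.length = streak.reverse.length := List.length_reverse.symm
  obtain ⟨k, hk⟩ : ∃ k, n.toNat = k + 1 := ⟨n.toNat - 1, by omega⟩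
  unfold should_inject_diagnose
  rw [if_neg (by omega)]
  cases hr : streak.reverse with
  | nil =>
    have hs : streak.length = 0 := by rw [hlen, hr]; rfl
    constructor
    · intro h; simp [pyLoopA] at h
    · rintro ⟨c, hle, -⟩; omega
  | cons a t =>
    have hlen' : streak.length = t.length + 1 := by rw [hlen, hr]; simp
    cases a with
    | none =>
      simp only [pyLoopA, Option.isSome_none, Bool.false_and, Bool.false_eq_true, false_iff]
      rintro ⟨c, hle, hall⟩
      have hmem : (none : Option String) ∈ (none :: t).take n.toNat := by
        rw [hk, List.take_succ_cons]; exact List.mem_cons_self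
      exact absurd (hall none hmem) (by simp)
    | some c =>
      simp only [pyLoopA, pyLoopA_some, Option.isSome_some, Bool.true_and, decide_eq_true_eq]
      have hiff := takeWhile_len_iff (· == some c) t k
      constructor
      · intro h
        have hk' : k ≤ (t.takeWhile (· == some c)).length := by omega
        obtain ⟨hall, hkle⟩ := hiff.mp hk'
        refine ⟨c, by omega, ?_⟩
        intro x hx
        rw [hk, List.take_succ_cons] at hx
        rcases List.mem_cons.mp hx with rfl | hx
        · rfl
        · exact eq_of_beq (hall x hx)
      · rintro ⟨c', hle, hall⟩
        have hhd : (some c : Option String) ∈ (some c :: t).take n.toNat := by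
          rw [hk, List.take_succ_cons]; exact List.mem_cons_self
        have hc : c = c' := by have := hall _ hhd; simpa using this
        subst hc
        have h1 : ∀ x ∈ t.take k, ((x == some c) = true) := by
          intro x hx
          have hmem : x ∈ (some c :: t).take n.toNat := by
            rw [hk, List.take_succ_cons]; exact List.mem_cons_of_mem _ hx
          simp [hall x hmem]
        have := hiff.mpr ⟨h1, by omega⟩
        omega

-- characterization of B for min_streak ≥ 2
theorem B_char (streak : List (Option String)) (n : Int) (hn : 2 ≤ n) :
    (should_inject_diagnose_alt streak n = true ↔
      ∃ c, n.toNat ≤ streak.length ∧ ∀ x ∈ streak.reverse.take n.toNat, x = some c) := by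
  have hn0 : (0:Int) ≤ n := by omega
  have hm2 : 2 ≤ n.toNat := by omega
  have hcast : ((n.toNat : Int)) = n := Int.toNat_of_nonneg hn0
  unfold should_inject_diagnose_alt
  rw [if_neg (by omega)]
  by_cases hL : (streak.length : Int) < n
  · rw [if_pos hL]
    simp only [Bool.false_eq_true, false_iff]
    rintro ⟨c, hle, -⟩
    omega
  · rw [if_neg hL]
    have hmle : n.toNat ≤ streak.length := by omega
    have htail : PySem.List.slice streak (some (-n)) none = streak.drop (streak.length - n.toNat) := by
      rw [← hcast]
      exact PySem.List.slice_from_neg_natCast streak n.toNat (by omega)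
    rw [htail]
    have hlen : (streak.drop (streak.length - n.toNat)).length = n.toNat := by
      simp; omega
    have hrev : (streak.drop (streak.length - n.toNat)).reverse = streak.reverse.take n.toNat := by
      rw [List.reverse_drop]
      congr 1
      omega
    have hmem : ∀ x : Option String,
        x ∈ streak.reverse.take n.toNat ↔ x ∈ streak.drop (streak.length - n.toNat) := by
      intro x; rw [← hrev, List.mem_reverse]
    cases htl : streak.drop (streak.length - n.toNat) with
    | nil => rw [htl] at hlen; simp at hlen; omega
    | cons h t2 =>
      rw [htl] at hmem
      have hget : PySem.List.pyGet? (h :: t2) 0 = some h := by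
        simp [PySem.List.pyGet?, PySem.List.pyIdx?]
      unfold pyTailCheck
      rw [hget]
      simp only [Bool.and_eq_true, List.all_eq_true, beq_iff_eq]
      constructor
      · rintro ⟨hs, hall⟩
        obtain ⟨c, hc⟩ := Option.isSome_iff_exists.mp hs
        refine ⟨c, hmle, fun x hx => ?_⟩
        rw [hmem] at hx
        rw [hall x hx, hc]
      · rintro ⟨c, -, hall⟩
        have hall' : ∀ x ∈ h :: t2, x = some c := fun x hx => hall x ((hmem x).mpr hx)
        have hh : h = some c := hall' h List.mem_cons_self
        exact ⟨by rw [hh]; rfl, fun x hx => by rw [hall' x hx, hh]⟩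

-- ===== VERDICT (by name: the statement is the Claim_ definition above) =====
theorem should_inject_diagnose_spec : Claim_equal_should_inject_diagnose := by
  intro streak min_streak _
  unfold Spec_should_inject_diagnose
  by_cases hn : min_streak < 2
  · unfold should_inject_diagnose should_inject_diagnose_alt
    rw [if_pos hn, if_pos hn]
  · have hn' : 2 ≤ min_streak := by omega
    have h := (A_char streak min_streak hn').trans (B_char streak min_streak hn').symm
    cases hA : should_inject_diagnose streak min_streak
    · cases hB : should_inject_diagnose_alt streak min_streak
      · rfl
      · exact absurd (h.mpr hB) (by simp [hA])
    · exact (h.mp hA).symm
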